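-- pv_equiv track=rewrite | github.com/daniel-reich/ubiquitous-fiesta | Y5Ji2HDnQTX7MxeHt_17.py | snakefill
-- ===== SOURCE A (Python) =====
-- def snakefill(n):
--   total_grid = n*n
--   current_grid = 1
--   i = 0
--   while current_grid + 2**i <= total_grid:
--     current_grid += 2**i
--     i += 1
--   return i
-- ===== SOURCE B (Python) =====
-- def snakefill(n):
--   total = n * n
--   return max(total.bit_length() - 1, 0)
-- ===== Notes on version B (the rewrite author's own statement) =====
-- stated objective: simpler
-- what changed: Replaces the power-of-two accumulation loop with the closed form max((n*n).bit_length()-1, 0), i.e. floor(log2(n*n)) clamped at 0.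
import Mathlib
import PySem

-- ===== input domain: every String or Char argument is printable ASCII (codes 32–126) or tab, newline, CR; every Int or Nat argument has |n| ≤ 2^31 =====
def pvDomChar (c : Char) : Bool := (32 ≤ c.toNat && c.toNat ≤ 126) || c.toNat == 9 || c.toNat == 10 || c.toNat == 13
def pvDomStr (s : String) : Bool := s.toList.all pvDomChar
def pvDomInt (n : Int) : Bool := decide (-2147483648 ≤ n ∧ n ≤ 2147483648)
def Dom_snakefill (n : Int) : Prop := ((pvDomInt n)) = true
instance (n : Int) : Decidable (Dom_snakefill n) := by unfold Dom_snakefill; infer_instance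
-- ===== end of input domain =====

-- B replaces A's power-of-two accumulation loop by the closed form
-- max(bit_length(n*n) - 1, 0); objective: simpler.

-- ===== PORT A =====
-- the while loop of A: while current + 2^i ≤ total: current += 2^i; i += 1
def snakefillLoop (total current : Int) (i : Nat) : Nat :=
  if h : current + 2 ^ i ≤ total then
    snakefillLoop total (current + 2 ^ i) (i + 1)
  else i
termination_by (total - current).toNat
decreasing_by
  have h2 : (0:Int) < 2 ^ i := by positivity
  omega

def snakefill (n : Int) : Int :=
  let total_grid := n * n
  (snakefillLoop total_grid 1 0 : Int)

-- ===== PORT B =====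
-- port of Python int.bit_length on naturals: 0 for 0, floor(log2 m)+1 otherwise
def pyBitLength (m : Nat) : Nat := if m = 0 then 0 else Nat.log2 m + 1

def snakefill_alt (n : Int) : Int :=
  let total := n * n
  max ((pyBitLength total.toNat : Int) - 1) 0

-- ===== PRECONDITION & SPEC =====
def Spec_snakefill (n : Int) (out : Int) : Prop := out = snakefill_alt n
instance (n : Int) (out : Int) : Decidable (Spec_snakefill n out) := by unfold Spec_snakefill; infer_instance

-- ===== CLAIM (what is proved, stated in full; the proofs are below) =====
def Claim_equal_snakefill : Prop := ∀ (n : Int), Dom_snakefill n → Spec_snakefill n (snakefill n)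

-- ===== LEMMAS AND PROOFS =====

-- A's loop, entered with current = 2^i ≤ total, returns the floor log2 of total.
theorem snakefillLoop_eq_log2 (total : Int) (i : Nat)
    (h : (2:Int) ^ i ≤ total) :
    snakefillLoop total (2 ^ i) i = Nat.log2 total.toNat := by
  rw [snakefillLoop]
  split
  · rename_i hle
    have : (2:Int) ^ i + 2 ^ i = 2 ^ (i + 1) := by ring
    rw [this]
    exact snakefillLoop_eq_log2 total (i + 1) (by omega)
  · rename_i hgt
    -- 2^i ≤ total < 2^(i+1), so log2 total = i
    have hub : total < 2 ^ (i + 1) := by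
      have : (2:Int) ^ (i+1) = 2 ^ i + 2 ^ i := by ring
      omega
    have h1 : (2:Nat) ^ i ≤ total.toNat := by
      have hp : ((2:Nat) ^ i : Int) = (2:Int) ^ i := by push_cast; ring
      omega
    have h2 : total.toNat < 2 ^ (i + 1) := by
      have hp : ((2:Nat) ^ (i+1) : Int) = (2:Int) ^ (i+1) := by push_cast; ring
      omega
    have := Nat.log2_eq_log_two (n := total.toNat)
    rw [this]
    exact (Nat.log_eq_of_pow_le_of_lt_pow h1 h2).symm
termination_by (total - 2 ^ i).toNat
decreasing_by
  have h2 : (0:Int) < 2 ^ i := by positivity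
  omega

theorem snakefill_eq_alt (n : Int) : snakefill n = snakefill_alt n := by
  unfold snakefill snakefill_alt
  by_cases h0 : n = 0
  · subst h0
    simp [snakefillLoop, pyBitLength]
  · have hpos : (1:Int) ≤ n * n := by
      rcases lt_or_gt_of_ne h0 with h | h
      · nlinarith
      · nlinarith
    have h1 : (2:Int) ^ 0 ≤ n * n := by simpa using hpos
    have hlog := snakefillLoop_eq_log2 (n * n) 0 h1
    simp only [pow_zero] at hlog
    simp only []
    rw [hlog]
    have htn : (n * n).toNat ≠ 0 := by omega
    simp [pyBitLength, htn]

-- ===== VERDICT (by name: the statement is the Claim_ definition above) =====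
theorem snakefill_spec : Claim_equal_snakefill := by
  intro n _
  exact snakefill_eq_alt n
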